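-- pv_equiv track=rewrite | github.com/grant-TraDA/NLP-2023W | 5. News Linker/MS3/code/documents.py | rank_dictionary
-- ===== SOURCE A (Python) =====
-- def sort_dictionary(dictionary):
--     return sorted(dictionary.items(), key=lambda x:x[1], reverse=True)
--
-- def rank_dictionary(dictionary):
--     dictionary_sorted = sort_dictionary(dictionary)
--     freq_sorted = [x[1] for x in dictionary_sorted]
--     ranks_dict = {}
--     for key, value in dictionary_sorted:
--         rank = freq_sorted.index(value) + 1
--         ranks_dict[key] = rank
--     return ranks_dict
-- ===== SOURCE B (Python) =====
-- def rank_dictionary(dictionary):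
--     # single pass over the sorted items with a running (previous value, its rank)
--     # instead of an O(n) list.index scan per item
--     items = sorted(dictionary.items(), key=lambda x: x[1], reverse=True)
--     ranks = {}
--     prev_value = None
--     prev_rank = 0
--     for i, (key, value) in enumerate(items):
--         if prev_value is None or value != prev_value:
--             prev_rank = i + 1
--             prev_value = value
--         ranks[key] = prev_rank
--     return ranks
-- ===== Notes on version B (the rewrite author's own statement) =====
-- stated objective: faster
-- what changed: Replaces the per-item list.index scan over the sorted value list with a single enumerate pass that carries the previous value and its rank, so each item's rank is computed in O(1).
import Mathlib
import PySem

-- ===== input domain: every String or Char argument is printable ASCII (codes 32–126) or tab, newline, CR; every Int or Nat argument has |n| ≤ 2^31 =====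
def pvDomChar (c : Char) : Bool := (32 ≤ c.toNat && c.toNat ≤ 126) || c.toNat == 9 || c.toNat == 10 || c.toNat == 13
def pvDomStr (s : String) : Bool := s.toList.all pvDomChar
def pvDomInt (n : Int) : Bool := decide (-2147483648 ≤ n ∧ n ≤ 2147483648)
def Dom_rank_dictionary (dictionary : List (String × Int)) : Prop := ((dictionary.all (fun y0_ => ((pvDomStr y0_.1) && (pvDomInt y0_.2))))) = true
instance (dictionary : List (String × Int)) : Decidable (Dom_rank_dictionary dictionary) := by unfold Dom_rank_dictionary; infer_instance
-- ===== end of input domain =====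

-- Header: B replaces A's per-item list.index scan with one pass over the sorted
-- items carrying the previous value and its rank (objective: faster).


-- ===== PORT A =====
-- sorted(dictionary.items(), key=lambda x: x[1], reverse=True)
def sort_dictionary (dictionary : List (String × Int)) : List (String × Int) :=
  PySem.List.sorted dictionary (fun x => x.2) true

-- freq_sorted.index(value) + 1; the value is an element's own value, so it is
-- always found: the `.getD 0` branch for Python's ValueError never fires.
def rankOf (freq_sorted : List Int) (value : Int) : Int :=
  (((PySem.List.index? freq_sorted value).getD 0 : Nat) : Int) + 1

def rank_dictionary (dictionary : List (String × Int)) : List (String × Int) :=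
  let dictionary_sorted := sort_dictionary dictionary
  let freq_sorted := dictionary_sorted.map (fun x => x.2)
  let ranks_dict :=
    dictionary_sorted.foldl
      (fun (d : PySem.Dict String Int) kv => d.insert kv.1 (rankOf freq_sorted kv.2))
      PySem.Dict.empty
  ranks_dict.items

-- ===== PORT B =====
-- the enumerate loop: i is the index, prev the previous value (None at start),
-- prevRank its rank
def rankLoop : List (String × Int) → Nat → Option Int → Int → PySem.Dict String Int → PySem.Dict String Int
  | [], _, _, _, d => d
  | (k, v) :: t, i, prev, prevRank, d =>
    if prev = some v then
      rankLoop t (i + 1) prev prevRank (d.insert k prevRank)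
    else
      rankLoop t (i + 1) (some v) ((i : Int) + 1) (d.insert k ((i : Int) + 1))

def rank_dictionary_alt (dictionary : List (String × Int)) : List (String × Int) :=
  (rankLoop (PySem.List.sorted dictionary (fun x => x.2) true) 0 none 0 PySem.Dict.empty).items

-- ===== PRECONDITION & SPEC =====
def Spec_rank_dictionary (dictionary : List (String × Int)) (out : List (String × Int)) : Prop := out = rank_dictionary_alt dictionary
instance (dictionary : List (String × Int)) (out : List (String × Int)) : Decidable (Spec_rank_dictionary dictionary out) := by unfold Spec_rank_dictionary; infer_instance

-- ===== CLAIM (what is proved, stated in full; the proofs are below) =====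
def Claim_equal_rank_dictionary : Prop := ∀ (dictionary : List (String × Int)), Dom_rank_dictionary dictionary → Spec_rank_dictionary dictionary (rank_dictionary dictionary)

-- ===== LEMMAS AND PROOFS =====

-- On a value-nonincreasing list, B's running-rank loop inserts exactly A's
-- rank (first index of the value in the value list, plus one) for every item.
lemma rankLoop_eq_foldl (freq : List Int) :
    ∀ (t p : List (String × Int)) (prev : Option Int) (prevRank : Int)
      (d : PySem.Dict String Int),
      freq = (p ++ t).map (fun x => x.2) →
      (p ++ t).Pairwise (fun a b => b.2 ≤ a.2) →
      (prev = none → p = []) →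
      (∀ pv, prev = some pv →
        pv ∈ p.map (fun x => x.2) ∧ (∀ w ∈ p.map (fun x => x.2), pv ≤ w) ∧
        prevRank = rankOf freq pv) →
      rankLoop t p.length prev prevRank d
        = t.foldl (fun d kv => d.insert kv.1 (rankOf freq kv.2)) d := by
  intro t
  induction t with
  | nil => intro p prev prevRank d _ _ _ _; rfl
  | cons kv t ih =>
    intro p prev prevRank d hfreq hpair hnone hsome
    obtain ⟨k, v⟩ := kv
    have hassoc : p ++ (k, v) :: t = (p ++ [(k, v)]) ++ t := by simp
    have hlen : (p ++ [(k, v)]).length = p.length + 1 := by simp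
    -- every later value is ≤ every earlier one
    have hle : ∀ a ∈ p, v ≤ a.2 := by
      intro a ha
      have := (List.pairwise_append.mp hpair).2.2 a ha (k, v) (by simp)
      exact this
    by_cases hv : prev = some v
    · -- equal value: reuse the previous rank
      obtain ⟨hmem, hmin, hrank⟩ := hsome v hv
      simp only [rankLoop, if_pos hv]
      have := ih (p ++ [(k, v)]) prev prevRank (d.insert k prevRank)
        (by simpa using hfreq) (by simpa using hpair)
        (by intro h; rw [h] at hv; cases hv)
        (by
          intro pv hpv
          rw [hv] at hpv; injection hpv with hpv; subst hpv
          refine ⟨by simp, ?_, hrank⟩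
          intro w hw
          simp only [List.map_append, List.mem_append, List.map_cons, List.map_nil,
            List.mem_singleton] at hw
          rcases hw with hw | hw
          · exact hmin w hw
          · simp [hw])
      rw [hlen] at this
      rw [this, List.foldl_cons, hrank]
    · -- new value: its first occurrence in freq is at index p.length
      have hnotmem : v ∉ p.map (fun x => x.2) := by
        intro hmem
        rcases prev with _ | pv
        · rw [hnone rfl] at hmem; simp at hmem
        · obtain ⟨hpvmem, hmin, _⟩ := hsome pv rfl
          -- v < pv ≤ w for every w in p's values, so v cannot be among them
          simp only [List.mem_map] at hmem hpvmem
          obtain ⟨a, ha, hav⟩ := hmem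
          obtain ⟨b, hb, hbv⟩ := hpvmem
          have h1 : v ≤ pv := by rw [← hbv]; exact hle b hb
          have h2 : pv ≤ a.2 := hmin a.2 (List.mem_map.mpr ⟨a, ha, rfl⟩)
          have hne : v ≠ pv := fun h => hv (by rw [h])
          exact hne (le_antisymm h1 (hav ▸ h2))
      have hidx : PySem.List.index? freq v = some p.length := by
        rw [PySem.List.index?_eq_some_iff]
        exact ⟨p.map (fun x => x.2), t.map (fun x => x.2),
          by simpa using hfreq, by simp, hnotmem⟩
      have hrankv : rankOf freq v = (p.length : Int) + 1 := by
        unfold rankOf; rw [hidx]; rfl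
      simp only [rankLoop, if_neg hv]
      have := ih (p ++ [(k, v)]) (some v) ((p.length : Int) + 1)
        (d.insert k ((p.length : Int) + 1))
        (by simpa using hfreq) (by simpa using hpair)
        (by intro h; cases h)
        (by
          intro pv hpv
          injection hpv with hpv; subst hpv
          refine ⟨by simp, ?_, hrankv.symm⟩
          intro w hw
          simp only [List.map_append, List.mem_append, List.map_cons, List.map_nil,
            List.mem_singleton] at hw
          rcases hw with hw | hw
          · exact le_of_lt (lt_of_le_of_ne
              (by
                simp only [List.mem_map] at hw
                obtain ⟨a, ha, hav⟩ := hw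
                rw [← hav]; exact hle a ha)
              (by
                intro h
                exact hnotmem (by rw [h]; exact hw)))
          · simp [hw])
      rw [hlen] at this
      rw [this, List.foldl_cons, hrankv]

-- ===== VERDICT (by name: the statement is the Claim_ definition above) =====
theorem rank_dictionary_spec : Claim_equal_rank_dictionary := by
  intro dictionary _
  unfold Spec_rank_dictionary rank_dictionary rank_dictionary_alt sort_dictionary
  have h := rankLoop_eq_foldl
    ((PySem.List.sorted dictionary (fun x => x.2) true).map (fun x => x.2))
    (PySem.List.sorted dictionary (fun x => x.2) true) [] none 0 PySem.Dict.empty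
    (by simp) (by simpa using PySem.List.sorted_pairwise_rev dictionary (fun x => x.2))
    (fun _ => rfl) (by intro pv h; cases h)
  simp only [List.length_nil] at h
  rw [h]
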